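-- pv_equiv track=rewrite | github.com/JacksonBowe/sst-saas-bootstrap | packages/core/utils/dynamo.py | build_update_expression
-- ===== SOURCE A (Python) =====
-- def build_update_expression(params: dict):
--     '''
--     Constructs the update expression for ddb update_item()
--     Input of params = { 'att1': 'val1', 'att2': 'val2' }
--     becomes ->
--         update_expression = set #att1=#att1, #att2=:att2
--         update_names = { '#att1': 'att1', '#att2': 'att2' }
--         update_values = { ':att1': 'val1', ':att2': 'val2}
--
--     returned as (update_expression, update_names, update_values)
--     '''
--     set_expression = []
--     remove_expression = []
--     update_names = dict()
--     update_values = dict()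
--     for key, val in params.items():
--         update_names[f'#{key}'] = key # To avoid 'reserved word' conflicts
--
--         if val is not None:
--             # SET new values
--             if not set_expression: set_expression.append('set ')
--             set_expression.append(f' #{key}=:{key},')
--             update_values[f':{key}'] = val # To avoid 'reserved word' conflicts
--
--         elif val is None:
--             # REMOVE values
--             if not remove_expression: remove_expression.append('remove ')
--             remove_expression.append(f' #{key},')
--
--     update_expression =  "".join(set_expression)[:-1] + "  " + "".join(remove_expression)[:-1]
--     return update_expression, update_names, update_values
-- ===== SOURCE B (Python) =====
-- def build_update_expression(params: dict):
--     # Build each clause body back-to-front: walk the items in reverse, prepending the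
--     # fragment for the current key with a ',' separator only when a body already exists.
--     set_body = ''
--     remove_body = ''
--     for key, val in reversed(list(params.items())):
--         if val is None:
--             frag = f' #{key}'
--             remove_body = frag + ',' + remove_body if remove_body else frag
--         else:
--             frag = f' #{key}=:{key}'
--             set_body = frag + ',' + set_body if set_body else frag
--
--     update_names = {f'#{k}': k for k in params}
--     update_values = {f':{k}': v for k, v in params.items() if v is not None}
--     expression = ('set ' + set_body if set_body else '') + '  ' + ('remove ' + remove_body if remove_body else '')
--     return expression, update_names, update_values
-- ===== Notes on version B (the rewrite author's own statement) =====
-- stated objective: alternative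
-- what changed: Replaces A's single stateful forward pass (append comma-suffixed fragments into two lists, concatenate, then slice off the trailing comma) with a back-to-front pass over the reversed items that prepends each fragment with a ',' separator only between fragments, and one dict comprehension per mapping instead of in-loop inserts.
import Mathlib
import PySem

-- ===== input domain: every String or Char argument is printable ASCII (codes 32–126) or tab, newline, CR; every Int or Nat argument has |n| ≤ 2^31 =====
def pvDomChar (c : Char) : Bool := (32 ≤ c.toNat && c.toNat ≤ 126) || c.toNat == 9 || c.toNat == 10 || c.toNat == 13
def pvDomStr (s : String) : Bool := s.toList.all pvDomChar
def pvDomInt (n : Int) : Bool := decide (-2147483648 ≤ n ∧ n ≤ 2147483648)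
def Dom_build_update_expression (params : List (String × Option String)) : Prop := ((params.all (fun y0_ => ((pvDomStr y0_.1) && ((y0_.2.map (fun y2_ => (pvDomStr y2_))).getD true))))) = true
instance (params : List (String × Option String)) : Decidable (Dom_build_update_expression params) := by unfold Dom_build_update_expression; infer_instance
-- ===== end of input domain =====

-- B replaces A's single accumulating forward pass (append fragments with trailing commas into
-- two lists, concatenate, trim the last comma by slicing) with a back-to-front pass over the
-- reversed items that prepends fragments with a ',' separator only between two fragments, plus
-- one dict comprehension per mapping; objective: alternative decomposition of the same task.

-- ===== PORT A =====
-- the body of A's for-loop (one dict item; branches in A's order)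
def buaStep (st : List String × List String × PySem.Dict String String × PySem.Dict String String)
    (kv : String × Option String) :
    List String × List String × PySem.Dict String String × PySem.Dict String String :=
  let un := st.2.2.1.insert ("#" ++ kv.1) kv.1
  match kv.2 with
  | some v =>
      ((if st.1 = [] then st.1 ++ ["set "] else st.1) ++ [" #" ++ kv.1 ++ "=:" ++ kv.1 ++ ","],
       st.2.1, un, st.2.2.2.insert (":" ++ kv.1) v)
  | none =>
      (st.1,
       (if st.2.1 = [] then st.2.1 ++ ["remove "] else st.2.1) ++ [" #" ++ kv.1 ++ ","],
       un, st.2.2.2)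

def build_update_expression (params : List (String × Option String)) :
    String × (List (String × String)) × (List (String × String)) :=
  let st := params.foldl buaStep ([], [], PySem.Dict.empty, PySem.Dict.empty)
  let update_expression :=
    PySem.Str.slice (PySem.Str.join "" st.1) none (some (-1)) ++ "  " ++
    PySem.Str.slice (PySem.Str.join "" st.2.1) none (some (-1))
  (update_expression, st.2.2.1.items, st.2.2.2.items)

-- ===== PORT B =====
-- the body of Source B's reversed loop: prepend the current fragment to (set_body, remove_body),
-- with a ',' separator only when that body is already non-empty; 'for … in reversed(list(params.items()))'
-- updating this state is List.foldr of the step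
def bStep (kv : String × Option String) (sr : String × String) : String × String :=
  match kv.2 with
  | none =>
      let frag := " #" ++ kv.1
      (sr.1, if sr.2 = "" then frag else frag ++ "," ++ sr.2)
  | some _ =>
      let frag := " #" ++ kv.1 ++ "=:" ++ kv.1
      (if sr.1 = "" then frag else frag ++ "," ++ sr.1, sr.2)

def build_update_expression_alt (params : List (String × Option String)) :
    String × (List (String × String)) × (List (String × String)) :=
  let sr := params.foldr bStep ("", "")
  let update_names := params.foldl (fun d kv => d.insert ("#" ++ kv.1) kv.1)
    (PySem.Dict.empty : PySem.Dict String String)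
  let update_values := params.foldl
    (fun d kv => match kv.2 with | some v => d.insert (":" ++ kv.1) v | none => d)
    (PySem.Dict.empty : PySem.Dict String String)
  let expression :=
    (if sr.1 = "" then "" else "set " ++ sr.1) ++ "  " ++
    (if sr.2 = "" then "" else "remove " ++ sr.2)
  (expression, update_names.items, update_values.items)

-- ===== PRECONDITION & SPEC =====
def Spec_build_update_expression (params : List (String × Option String)) (out : String × (List (String × String)) × (List (String × String))) : Prop := out = build_update_expression_alt params
instance (params : List (String × Option String)) (out : String × (List (String × String)) × (List (String × String))) : Decidable (Spec_build_update_expression params out) := by unfold Spec_build_update_expression; infer_instance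

-- ===== CLAIM (what is proved, stated in full; the proofs are below) =====
def Claim_equal_build_update_expression : Prop := ∀ (params : List (String × Option String)), Dom_build_update_expression params → Spec_build_update_expression params (build_update_expression params)

-- ===== LEMMAS AND PROOFS =====

-- component steps of A's loop, for reasoning about the product fold one field at a time
def seStep (se : List String) (kv : String × Option String) : List String :=
  match kv.2 with
  | some _ => (if se = [] then se ++ ["set "] else se) ++ [" #" ++ kv.1 ++ "=:" ++ kv.1 ++ ","]
  | none => se

def reStep (re : List String) (kv : String × Option String) : List String :=
  match kv.2 with
  | some _ => re
  | none => (if re = [] then re ++ ["remove "] else re) ++ [" #" ++ kv.1 ++ ","]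

lemma fold_split (params : List (String × Option String)) (se re : List String)
    (un uv : PySem.Dict String String) :
    params.foldl buaStep (se, re, un, uv) =
      (params.foldl seStep se, params.foldl reStep re,
       params.foldl (fun d kv => d.insert ("#" ++ kv.1) kv.1) un,
       params.foldl (fun d kv => match kv.2 with | some v => d.insert (":" ++ kv.1) v | none => d) uv) := by
  induction params generalizing se re un uv with
  | nil => rfl
  | cons kv rest ih =>
      cases h : kv.2 <;> simp [buaStep, seStep, reStep, h, ih]

lemma se_fold_ne_nil (params : List (String × Option String)) (acc : List String) (h : acc ≠ []) :
    params.foldl seStep acc =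
      acc ++ (params.filterMap (fun kv => kv.2.map (fun v => (kv.1, v)))).map
        (fun kv => " #" ++ kv.1 ++ "=:" ++ kv.1 ++ ",") := by
  induction params generalizing acc with
  | nil => simp
  | cons kv rest ih =>
      cases hkv : kv.2 with
      | none => simp [seStep, hkv, ih acc h]
      | some v =>
          have : acc ++ [" #" ++ kv.1 ++ "=:" ++ kv.1 ++ ","] ≠ [] := by simp
          simp [seStep, hkv, h, ih _ this]

lemma se_fold_nil (params : List (String × Option String)) :
    params.foldl seStep [] =
      (if (params.filterMap (fun kv => kv.2.map (fun v => (kv.1, v)))) = [] then ([] : List String)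
       else "set " :: (params.filterMap (fun kv => kv.2.map (fun v => (kv.1, v)))).map
         (fun kv => " #" ++ kv.1 ++ "=:" ++ kv.1 ++ ",")) := by
  induction params with
  | nil => rfl
  | cons kv rest ih =>
      cases hkv : kv.2 with
      | none =>
          have h1 : seStep [] kv = [] := by simp [seStep, hkv]
          have h2 : (kv :: rest).filterMap (fun kv => kv.2.map (fun v => (kv.1, v))) =
              rest.filterMap (fun kv => kv.2.map (fun v => (kv.1, v))) := by simp [hkv]
          rw [List.foldl_cons, h1, h2]; exact ih
      | some v =>
          have h1 : seStep [] kv = ["set ", " #" ++ kv.1 ++ "=:" ++ kv.1 ++ ","] := by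
            simp [seStep, hkv]
          have h2 : (kv :: rest).filterMap (fun kv => kv.2.map (fun v => (kv.1, v))) =
              (kv.1, v) :: rest.filterMap (fun kv => kv.2.map (fun v => (kv.1, v))) := by simp [hkv]
          rw [List.foldl_cons, h1, h2, se_fold_ne_nil rest _ (by simp)]
          simp

lemma re_fold_ne_nil (params : List (String × Option String)) (acc : List String) (h : acc ≠ []) :
    params.foldl reStep acc =
      acc ++ ((params.filter (fun kv => kv.2.isNone)).map (fun kv => kv.1)).map
        (fun k => " #" ++ k ++ ",") := by
  induction params generalizing acc with
  | nil => simp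
  | cons kv rest ih =>
      cases hkv : kv.2 with
      | some v => simp [reStep, hkv, ih acc h]
      | none =>
          have : acc ++ [" #" ++ kv.1 ++ ","] ≠ [] := by simp
          simp [reStep, hkv, h, ih _ this]

lemma re_fold_nil (params : List (String × Option String)) :
    params.foldl reStep [] =
      (if ((params.filter (fun kv => kv.2.isNone)).map (fun kv => kv.1)) = [] then ([] : List String)
       else "remove " :: ((params.filter (fun kv => kv.2.isNone)).map (fun kv => kv.1)).map
         (fun k => " #" ++ k ++ ",")) := by
  induction params with
  | nil => rfl
  | cons kv rest ih =>
      cases hkv : kv.2 with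
      | some v =>
          have h1 : reStep [] kv = [] := by simp [reStep, hkv]
          have h2 : ((kv :: rest).filter (fun kv => kv.2.isNone)).map (fun kv => kv.1) =
              (rest.filter (fun kv => kv.2.isNone)).map (fun kv => kv.1) := by simp [hkv]
          rw [List.foldl_cons, h1, h2]; exact ih
      | none =>
          have h1 : reStep [] kv = ["remove ", " #" ++ kv.1 ++ ","] := by simp [reStep, hkv]
          have h2 : ((kv :: rest).filter (fun kv => kv.2.isNone)).map (fun kv => kv.1) =
              kv.1 :: (rest.filter (fun kv => kv.2.isNone)).map (fun kv => kv.1) := by simp [hkv]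
          rw [List.foldl_cons, h1, h2, re_fold_ne_nil rest _ (by simp)]
          simp

lemma join_nil_flatten (l : List (List Char)) : PySem.Chars.join [] l = l.flatten := by
  induction l with
  | nil => simp [PySem.Chars.join_nil]
  | cons a l ih =>
      cases l with
      | nil => simp [PySem.Chars.join_singleton]
      | cons b m => rw [PySem.Chars.join_cons_cons, List.flatten_cons, ih]; simp

lemma join_comma_append (ys : List (List Char)) (h : ys ≠ []) :
    PySem.Chars.join [','] ys ++ [','] = (ys.map (· ++ [','])).flatten := by
  induction ys with
  | nil => exact absurd rfl h
  | cons y ys ih =>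
      cases ys with
      | nil => simp [PySem.Chars.join_singleton]
      | cons z zs =>
          rw [PySem.Chars.join_cons_cons, List.map_cons, List.flatten_cons,
            List.append_assoc, List.append_assoc, ← ih (by simp)]
          simp

lemma slice_join_empty :
    PySem.Str.slice (PySem.Str.join "" ([] : List String)) none (some (-1)) = "" := by
  decide

-- A's "append ',' to every fragment, concatenate, drop the last char" IS a ','-join
lemma slice_join_comma (pre : String) (xs : List String) (h : xs ≠ []) :
    PySem.Str.slice (PySem.Str.join "" (pre :: xs.map (· ++ ","))) none (some (-1)) =
      pre ++ PySem.Str.join "," xs := by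
  apply String.toList_inj.mp
  rw [PySem.Str.slice_to_neg_one, PySem.Str.toList_join, String.toList_append, PySem.Str.toList_join]
  have hc : (",":String).toList = [','] := rfl
  have he : ("":String).toList = [] := rfl
  have hmap : List.map String.toList (xs.map (· ++ ",")) = (xs.map String.toList).map (· ++ [',']) := by
    simp [List.map_map, Function.comp_def, String.toList_append, hc]
  rw [he, hc, List.map_cons, hmap, join_nil_flatten, List.flatten_cons,
    ← join_comma_append (xs.map String.toList) (by simpa using h),
    ← List.append_assoc, List.dropLast_concat]

lemma str_join_comma_cons (x : String) (xs : List String) (h : xs ≠ []) :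
    PySem.Str.join "," (x :: xs) = x ++ "," ++ PySem.Str.join "," xs := by
  apply String.toList_inj.mp
  cases xs with
  | nil => exact absurd rfl h
  | cons y ys =>
      rw [PySem.Str.toList_join, List.map_cons, List.map_cons, PySem.Chars.join_cons_cons]
      simp [PySem.Str.toList_join]

lemma str_join_singleton' (x : String) : PySem.Str.join "," [x] = x := by
  apply String.toList_inj.mp
  rw [PySem.Str.toList_join, List.map_cons, List.map_nil, PySem.Chars.join_singleton]

lemma str_join_comma_ne_empty (x : String) (xs : List String) (hx : x.toList ≠ []) :
    PySem.Str.join "," (x :: xs) ≠ "" := by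
  intro hcontra
  have h := congrArg String.toList hcontra
  rw [PySem.Str.toList_join, List.map_cons] at h
  cases xs with
  | nil =>
      rw [List.map_nil, PySem.Chars.join_singleton] at h
      exact hx (by simpa using h)
  | cons y ys =>
      rw [List.map_cons, PySem.Chars.join_cons_cons] at h
      cases hx' : x.toList with
      | nil => exact hx hx'
      | cons c cs => rw [hx'] at h; simp at h

-- B's backwards loop leaves in set_body the ','-join of the SET fragments
lemma bFold_fst (params : List (String × Option String)) :
    (params.foldr bStep ("", "")).1 =
      (if (params.filterMap (fun kv => kv.2.map (fun v => (kv.1, v)))) = [] then ""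
       else PySem.Str.join ","
         ((params.filterMap (fun kv => kv.2.map (fun v => (kv.1, v)))).map
           (fun kv => " #" ++ kv.1 ++ "=:" ++ kv.1))) := by
  induction params with
  | nil => rfl
  | cons kv rest ih =>
      cases hkv : kv.2 with
      | none =>
          have h2 : (kv :: rest).filterMap (fun kv => kv.2.map (fun v => (kv.1, v))) =
              rest.filterMap (fun kv => kv.2.map (fun v => (kv.1, v))) := by simp [hkv]
          simp only [List.foldr_cons, bStep, hkv]
          rw [h2]; exact ih
      | some v =>
          have hsi : (kv :: rest).filterMap (fun kv => kv.2.map (fun v => (kv.1, v))) =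
              (kv.1, v) :: rest.filterMap (fun kv => kv.2.map (fun v => (kv.1, v))) := by
            simp [hkv]
          simp only [List.foldr_cons, bStep, hkv, hsi]
          by_cases hrest : rest.filterMap (fun kv => kv.2.map (fun v => (kv.1, v))) = []
          · rw [ih, hrest]
            simp [str_join_singleton']
          · have hne : PySem.Str.join ","
                ((rest.filterMap (fun kv => kv.2.map (fun v => (kv.1, v)))).map
                  (fun kv => " #" ++ kv.1 ++ "=:" ++ kv.1)) ≠ "" := by
              obtain ⟨a, t, ht⟩ := List.exists_cons_of_ne_nil hrest
              rw [ht, List.map_cons]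
              exact str_join_comma_ne_empty _ _ (by simp [String.toList_append])
            have hconsne : ((kv.1, v) :: rest.filterMap (fun kv => kv.2.map (fun v => (kv.1, v)))) ≠ ([] : List (String × String)) := by simp
            rw [ih, if_neg hrest, if_neg hne, if_neg hconsne, List.map_cons,
              str_join_comma_cons _ _ (by simpa using hrest)]

-- B's backwards loop leaves in remove_body the ','-join of the REMOVE fragments
lemma bFold_snd (params : List (String × Option String)) :
    (params.foldr bStep ("", "")).2 =
      (if ((params.filter (fun kv => kv.2.isNone)).map (fun kv => kv.1)) = [] then ""
       else PySem.Str.join ","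
         (((params.filter (fun kv => kv.2.isNone)).map (fun kv => kv.1)).map
           (fun k => " #" ++ k))) := by
  induction params with
  | nil => rfl
  | cons kv rest ih =>
      cases hkv : kv.2 with
      | some v =>
          have h2 : ((kv :: rest).filter (fun kv => kv.2.isNone)).map (fun kv => kv.1) =
              (rest.filter (fun kv => kv.2.isNone)).map (fun kv => kv.1) := by simp [hkv]
          simp only [List.foldr_cons, bStep, hkv]
          rw [h2]; exact ih
      | none =>
          have hrk : ((kv :: rest).filter (fun kv => kv.2.isNone)).map (fun kv => kv.1) =
              kv.1 :: (rest.filter (fun kv => kv.2.isNone)).map (fun kv => kv.1) := by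
            simp [hkv]
          simp only [List.foldr_cons, bStep, hkv, hrk]
          by_cases hrest : (rest.filter (fun kv => kv.2.isNone)).map (fun kv => kv.1) = []
          · rw [ih, hrest]
            simp [str_join_singleton']
          · have hne : PySem.Str.join ","
                (((rest.filter (fun kv => kv.2.isNone)).map (fun kv => kv.1)).map
                  (fun k => " #" ++ k)) ≠ "" := by
              obtain ⟨a, t, ht⟩ := List.exists_cons_of_ne_nil hrest
              rw [ht, List.map_cons]
              exact str_join_comma_ne_empty _ _ (by simp [String.toList_append])
            have hconsne : (kv.1 :: (rest.filter (fun kv => kv.2.isNone)).map (fun kv => kv.1)) ≠ ([] : List String) := by simp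
            rw [ih, if_neg hrest, if_neg hne, if_neg hconsne, List.map_cons,
              str_join_comma_cons _ _ (by simpa using hrest)]

-- ===== VERDICT (by name: the statement is the Claim_ definition above) =====
theorem build_update_expression_spec : Claim_equal_build_update_expression := by
  intro params _
  unfold Spec_build_update_expression
  simp only [build_update_expression, build_update_expression_alt]
  rw [fold_split, se_fold_nil, re_fold_nil, bFold_fst, bFold_snd]
  set si := params.filterMap (fun kv => kv.2.map (fun v => (kv.1, v))) with hsi
  set rk := (params.filter (fun kv => kv.2.isNone)).map (fun kv => kv.1) with hrk
  refine Prod.ext ?_ rfl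
  simp only
  have hset : PySem.Str.slice (PySem.Str.join ""
        (if si = [] then [] else "set " :: si.map (fun kv => " #" ++ kv.1 ++ "=:" ++ kv.1 ++ ",")))
        none (some (-1)) =
      (if (if si = [] then "" else PySem.Str.join "," (si.map (fun kv => " #" ++ kv.1 ++ "=:" ++ kv.1))) = ""
       then "" else "set " ++ (if si = [] then "" else PySem.Str.join "," (si.map (fun kv => " #" ++ kv.1 ++ "=:" ++ kv.1)))) := by
    by_cases h1 : si = []
    · simp [h1, slice_join_empty]
    · obtain ⟨a, t, ht⟩ := List.exists_cons_of_ne_nil h1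
      have hne : PySem.Str.join "," (si.map (fun kv => " #" ++ kv.1 ++ "=:" ++ kv.1)) ≠ "" := by
        rw [ht, List.map_cons]
        exact str_join_comma_ne_empty _ _ (by simp [String.toList_append])
      rw [if_neg h1, if_neg h1, if_neg hne]
      have hmap : si.map (fun kv => " #" ++ kv.1 ++ "=:" ++ kv.1 ++ ",") =
          (si.map (fun kv => " #" ++ kv.1 ++ "=:" ++ kv.1)).map (· ++ ",") := by
        rw [List.map_map]; rfl
      rw [hmap, slice_join_comma _ _ (by simpa using h1)]
  have hrem : PySem.Str.slice (PySem.Str.join ""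
        (if rk = [] then [] else "remove " :: rk.map (fun k => " #" ++ k ++ ",")))
        none (some (-1)) =
      (if (if rk = [] then "" else PySem.Str.join "," (rk.map (fun k => " #" ++ k))) = ""
       then "" else "remove " ++ (if rk = [] then "" else PySem.Str.join "," (rk.map (fun k => " #" ++ k)))) := by
    by_cases h2 : rk = []
    · simp [h2, slice_join_empty]
    · obtain ⟨a, t, ht⟩ := List.exists_cons_of_ne_nil h2
      have hne : PySem.Str.join "," (rk.map (fun k => " #" ++ k)) ≠ "" := by
        rw [ht, List.map_cons]
        exact str_join_comma_ne_empty _ _ (by simp [String.toList_append])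
      rw [if_neg h2, if_neg h2, if_neg hne]
      have hmap : rk.map (fun k => " #" ++ k ++ ",") = (rk.map (fun k => " #" ++ k)).map (· ++ ",") := by
        simp [List.map_map, Function.comp_def]
      rw [hmap, slice_join_comma _ _ (by simpa using h2)]
  rw [hset, hrem]
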